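-- pv_equiv track=rewrite | github.com/KebabRonin/Metode-Inspirate-din-Natura | H3_PSO/PSO.py | _get_valid_swaps
-- ===== SOURCE A (Python) =====
-- from typing import List, Tuple, Dict
--
-- def _get_valid_swaps(current: List, target: List) -> List[Tuple[int, int]]:
--     """Generate valid swaps that move current solution towards target"""
--     valid_swaps = []
--
--     # Find positions where elements differ
--     for i in range(len(current)):
--         for j in range(i + 1, len(current)):
--             # Only consider swaps between cities (non-zero elements)
--             if current[i] != 0 and current[j] != 0:
--                 # Check if swap would move towards target
--                 if (current[i] != target[i] and current[j] != target[j] and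
--                         (current[i] == target[j] or current[j] == target[i])):
--                     valid_swaps.append((i, j))
--
--     return valid_swaps
-- ===== SOURCE B (Python) =====
-- from typing import List, Tuple
--
-- def _get_valid_swaps(current: List, target: List) -> List[Tuple[int, int]]:
--     """Generate valid swaps that move current solution towards target.
--
--     Instead of testing every pair (i, j), index positions by value once
--     (value -> positions in current, value -> positions in target) and for
--     each mismatched i look up only the candidate j's that can satisfy
--     current[i] == target[j] or current[j] == target[i]."""
--     n = len(current)
--     cpos = {}
--     for j, v in enumerate(current):
--         cpos.setdefault(v, []).append(j)
--     tpos = {}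
--     for j in range(n):
--         tpos.setdefault(target[j], []).append(j)
--     valid_swaps = []
--     for i in range(n):
--         ci = current[i]
--         if ci == 0 or ci == target[i]:
--             continue
--         for j in sorted(set(cpos.get(target[i], []) + tpos.get(ci, []))):
--             cj = current[j]
--             if j > i and cj != 0 and cj != target[j] and (ci == target[j] or cj == target[i]):
--                 valid_swaps.append((i, j))
--     return valid_swaps
-- ===== Notes on version B (the rewrite author's own statement) =====
-- stated objective: faster
-- what changed: Replaces the all-pairs double loop with two value-to-positions dicts (one over current, one over target) so that for each mismatched i only the looked-up candidate j's are tested, deduplicated and emitted in sorted order.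
-- outside the precondition, e.g. on _get_valid_swaps([0, 0], []): A returns [], B raises IndexError
import Mathlib
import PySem

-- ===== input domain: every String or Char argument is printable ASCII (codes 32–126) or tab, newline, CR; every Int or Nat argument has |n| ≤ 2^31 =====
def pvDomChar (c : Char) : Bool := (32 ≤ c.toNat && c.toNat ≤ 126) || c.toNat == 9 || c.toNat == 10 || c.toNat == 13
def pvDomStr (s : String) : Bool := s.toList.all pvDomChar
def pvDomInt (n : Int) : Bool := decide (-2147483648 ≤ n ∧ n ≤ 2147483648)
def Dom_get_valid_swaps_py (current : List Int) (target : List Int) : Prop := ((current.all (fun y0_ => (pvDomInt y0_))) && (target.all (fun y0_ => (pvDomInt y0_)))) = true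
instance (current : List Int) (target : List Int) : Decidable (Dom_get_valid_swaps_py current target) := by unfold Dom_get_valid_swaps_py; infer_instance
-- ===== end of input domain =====

-- B replaces A's all-pairs O(n^2) scan by two value→positions dicts with per-i candidate lookup
-- (measurably faster on permutation-like inputs); equivalence of return values is proved below.


-- ===== PORT A =====
def get_valid_swaps_py (current : List Int) (target : List Int) : List (Int × Int) :=
  (PySem.List.pyRange 0 (current.length : Int) 1).foldl (fun acc i =>
    (PySem.List.pyRange (i + 1) (current.length : Int) 1).foldl (fun acc2 j =>
      if PySem.List.pyGetD current i 0 ≠ 0 ∧ PySem.List.pyGetD current j 0 ≠ 0 then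
        if PySem.List.pyGetD current i 0 ≠ PySem.List.pyGetD target i 0 ∧
            PySem.List.pyGetD current j 0 ≠ PySem.List.pyGetD target j 0 ∧
            (PySem.List.pyGetD current i 0 = PySem.List.pyGetD target j 0 ∨
              PySem.List.pyGetD current j 0 = PySem.List.pyGetD target i 0) then
          acc2 ++ [(i, j)]
        else acc2
      else acc2) acc) []

-- ===== PORT B =====
def get_valid_swaps_py_alt (current : List Int) (target : List Int) : List (Int × Int) :=
  let cpos : PySem.Dict Int (List Int) :=
    (PySem.List.enumerate current 0).foldl
      (fun d p => d.modify p.2 [] (· ++ [p.1])) PySem.Dict.empty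
  let tpos : PySem.Dict Int (List Int) :=
    (PySem.List.pyRange 0 (current.length : Int) 1).foldl
      (fun d j => d.modify (PySem.List.pyGetD target j 0) [] (· ++ [j])) PySem.Dict.empty
  (PySem.List.pyRange 0 (current.length : Int) 1).foldl (fun acc i =>
    let ci := PySem.List.pyGetD current i 0
    if ci = 0 ∨ ci = PySem.List.pyGetD target i 0 then acc
    else
      (PySem.List.sorted (PySem.Set.ofList
          (cpos.getD (PySem.List.pyGetD target i 0) [] ++ tpos.getD ci []))
        (fun x => x) false).foldl (fun acc2 j =>
        let cj := PySem.List.pyGetD current j 0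
        if i < j ∧ cj ≠ 0 ∧ cj ≠ PySem.List.pyGetD target j 0 ∧
            (ci = PySem.List.pyGetD target j 0 ∨ cj = PySem.List.pyGetD target i 0) then
          acc2 ++ [(i, j)]
        else acc2) acc) []

-- ===== PRECONDITION & SPEC =====
-- Pre_ excludes inputs where target is shorter than current: there A's target[i]/target[j]
-- (and B's target[j] while indexing target positions) can raise IndexError; A still returns []
-- on some of them (e.g. when no pair of nonzero current entries reaches the comparison).
def Pre_get_valid_swaps_py (current : List Int) (target : List Int) : Prop :=
  current.length ≤ target.length
instance (current : List Int) (target : List Int) : Decidable (Pre_get_valid_swaps_py current target) := by unfold Pre_get_valid_swaps_py; infer_instance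
def pvWitness_get_valid_swaps_py : List Int × List Int := ([1, 2], [2, 1])
def Spec_get_valid_swaps_py (current : List Int) (target : List Int) (out : List (Int × Int)) : Prop := out = get_valid_swaps_py_alt current target
instance (current : List Int) (target : List Int) (out : List (Int × Int)) : Decidable (Spec_get_valid_swaps_py current target out) := by unfold Spec_get_valid_swaps_py; infer_instance

-- ===== CLAIM (what is proved, stated in full; the proofs are below) =====
def Claim_equal_get_valid_swaps_py : Prop := ∀ (current : List Int) (target : List Int), Dom_get_valid_swaps_py current target → Pre_get_valid_swaps_py current target → Spec_get_valid_swaps_py current target (get_valid_swaps_py current target)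

-- ===== LEMMAS AND PROOFS =====

-- Two strictly increasing lists with the same members are equal.
theorem pv_eq_of_mem_iff {l1 l2 : List Int} (s1 : l1.Pairwise (· < ·)) (s2 : l2.Pairwise (· < ·))
    (h : ∀ a, a ∈ l1 ↔ a ∈ l2) : l1 = l2 := by
  refine List.Perm.eq_of_pairwise (fun a b _ _ hab hba => absurd hab (not_lt.mpr hba.le)) s1 s2 ?_
  exact (List.perm_ext_iff_of_nodup (s1.imp ne_of_lt) (s2.imp ne_of_lt)).mpr h

-- Membership in a value→positions dict built by a setdefault/append loop.
theorem pv_mem_posDict (l : List Int) (key : Int → Int) (v j : Int) :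
    j ∈ (l.foldl (fun d k => d.modify (key k) ([] : List Int) (· ++ [k])) PySem.Dict.empty).getD v []
      ↔ j ∈ l ∧ key j = v := by
  rw [show (l.foldl (fun d k => d.modify (key k) ([] : List Int) (· ++ [k])) PySem.Dict.empty)
      = (l.map (fun k => (key k, k))).foldl (fun d p => d.modify p.1 [] (· ++ [p.2])) PySem.Dict.empty by
    rw [List.foldl_map]]
  rw [PySem.Dict.getD_foldl_modify_append]
  simp [PySem.Dict.getD_empty, List.mem_filter]

theorem pv_mem_cpos (current : List Int) (v j : Int) :
    j ∈ ((PySem.List.enumerate current 0).foldl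
          (fun d p => d.modify p.2 ([] : List Int) (· ++ [p.1])) PySem.Dict.empty).getD v []
      ↔ (0 ≤ j ∧ j < (current.length : Int)) ∧ PySem.List.pyGetD current j 0 = v := by
  rw [PySem.List.enumerate_eq_map_pyRange (d := 0), List.foldl_map]
  exact (pv_mem_posDict (PySem.List.pyRange 0 (current.length : Int) 1)
      (fun k => PySem.List.pyGetD current k 0) v j).trans
    (by rw [PySem.List.mem_pyRange_one])

theorem pv_mem_tpos (current target : List Int) (v j : Int) :
    j ∈ ((PySem.List.pyRange 0 (current.length : Int) 1).foldl
          (fun d k => d.modify (PySem.List.pyGetD target k 0) ([] : List Int) (· ++ [k])) PySem.Dict.empty).getD v []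
      ↔ (0 ≤ j ∧ j < (current.length : Int)) ∧ PySem.List.pyGetD target j 0 = v := by
  exact (pv_mem_posDict (PySem.List.pyRange 0 (current.length : Int) 1)
      (fun k => PySem.List.pyGetD target k 0) v j).trans
    (by rw [PySem.List.mem_pyRange_one])

-- The inner filtered lists of the two ports coincide (non-skipped i).
theorem pv_filter_eq (current target : List Int) (i : Int) (hi : 0 ≤ i)
    (hc0 : PySem.List.pyGetD current i 0 ≠ 0)
    (hct : PySem.List.pyGetD current i 0 ≠ PySem.List.pyGetD target i 0) :
    (PySem.List.pyRange (i + 1) (current.length : Int) 1).filter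
        (fun j => decide ((PySem.List.pyGetD current i 0 ≠ 0 ∧ PySem.List.pyGetD current j 0 ≠ 0) ∧
          PySem.List.pyGetD current i 0 ≠ PySem.List.pyGetD target i 0 ∧
          PySem.List.pyGetD current j 0 ≠ PySem.List.pyGetD target j 0 ∧
          (PySem.List.pyGetD current i 0 = PySem.List.pyGetD target j 0 ∨
            PySem.List.pyGetD current j 0 = PySem.List.pyGetD target i 0)))
      = (PySem.List.sorted (PySem.Set.ofList
            (((PySem.List.enumerate current 0).foldl
                (fun d p => d.modify p.2 ([] : List Int) (· ++ [p.1])) PySem.Dict.empty).getD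
                (PySem.List.pyGetD target i 0) [] ++
              ((PySem.List.pyRange 0 (current.length : Int) 1).foldl
                (fun d k => d.modify (PySem.List.pyGetD target k 0) ([] : List Int) (· ++ [k]))
                PySem.Dict.empty).getD (PySem.List.pyGetD current i 0) []))
          (fun x => x) false).filter
        (fun j => decide (i < j ∧ PySem.List.pyGetD current j 0 ≠ 0 ∧
          PySem.List.pyGetD current j 0 ≠ PySem.List.pyGetD target j 0 ∧
          (PySem.List.pyGetD current i 0 = PySem.List.pyGetD target j 0 ∨
            PySem.List.pyGetD current j 0 = PySem.List.pyGetD target i 0))) := by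
  apply pv_eq_of_mem_iff
  · exact (PySem.List.pairwise_lt_pyRange_one (i + 1) (current.length : Int)).filter _
  · exact (PySem.List.sorted_ofList_pairwise_lt _).filter _
  · intro a
    simp only [List.mem_filter, PySem.List.mem_pyRange_one, PySem.List.mem_sorted,
      PySem.Set.mem_ofList, List.mem_append, pv_mem_cpos, pv_mem_tpos, decide_eq_true_eq]
    constructor
    · rintro ⟨⟨h1, h2⟩, ⟨-, hca⟩, -, hta, hor⟩
      refine ⟨?_, by omega, hca, hta, hor⟩
      rcases hor with h | h
      · exact Or.inr ⟨⟨by omega, h2⟩, h.symm⟩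
      · exact Or.inl ⟨⟨by omega, h2⟩, h⟩
    · rintro ⟨hmem, hlt, hca, hta, hor⟩
      rcases hmem with ⟨⟨h1, h2⟩, -⟩ | ⟨⟨h1, h2⟩, -⟩ <;>
        exact ⟨⟨by omega, h2⟩, ⟨hc0, hca⟩, hct, hta, hor⟩

-- ===== VERDICT (by name: the statement is the Claim_ definition above) =====
theorem get_valid_swaps_py_spec : Claim_equal_get_valid_swaps_py := by
  intro current target _ _
  unfold Spec_get_valid_swaps_py
  simp only [get_valid_swaps_py, get_valid_swaps_py_alt]
  apply PySem.List.foldl_congr_mem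
  intro acc i hi
  have hi0 : 0 ≤ i := (PySem.List.mem_pyRange_one.mp hi).1
  -- collapse A's nested ifs and turn both inner loops into filter/map form
  have hcollapse : ∀ (acc2 : List (Int × Int)) (j : Int),
      (if PySem.List.pyGetD current i 0 ≠ 0 ∧ PySem.List.pyGetD current j 0 ≠ 0 then
        if PySem.List.pyGetD current i 0 ≠ PySem.List.pyGetD target i 0 ∧
            PySem.List.pyGetD current j 0 ≠ PySem.List.pyGetD target j 0 ∧
            (PySem.List.pyGetD current i 0 = PySem.List.pyGetD target j 0 ∨
              PySem.List.pyGetD current j 0 = PySem.List.pyGetD target i 0) then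
          acc2 ++ [(i, j)] else acc2
      else acc2)
      = if (PySem.List.pyGetD current i 0 ≠ 0 ∧ PySem.List.pyGetD current j 0 ≠ 0) ∧
          PySem.List.pyGetD current i 0 ≠ PySem.List.pyGetD target i 0 ∧
          PySem.List.pyGetD current j 0 ≠ PySem.List.pyGetD target j 0 ∧
          (PySem.List.pyGetD current i 0 = PySem.List.pyGetD target j 0 ∨
            PySem.List.pyGetD current j 0 = PySem.List.pyGetD target i 0) then
        acc2 ++ [(i, j)] else acc2 := by
    intro acc2 j; split_ifs <;> tauto
  simp only [hcollapse]
  rw [PySem.List.foldl_append_ite]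
  by_cases hskip : PySem.List.pyGetD current i 0 = 0 ∨
      PySem.List.pyGetD current i 0 = PySem.List.pyGetD target i 0
  · rw [if_pos hskip]
    have : ∀ j, ¬ ((PySem.List.pyGetD current i 0 ≠ 0 ∧ PySem.List.pyGetD current j 0 ≠ 0) ∧
        PySem.List.pyGetD current i 0 ≠ PySem.List.pyGetD target i 0 ∧
        PySem.List.pyGetD current j 0 ≠ PySem.List.pyGetD target j 0 ∧
        (PySem.List.pyGetD current i 0 = PySem.List.pyGetD target j 0 ∨
          PySem.List.pyGetD current j 0 = PySem.List.pyGetD target i 0)) := by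
      rintro j ⟨⟨h0, -⟩, hne, -⟩; tauto
    rw [List.filter_eq_nil_iff.mpr (fun j _ => by simpa using this j)]
    simp
  · push Not at hskip
    rw [if_neg (by tauto : ¬ (PySem.List.pyGetD current i 0 = 0 ∨
        PySem.List.pyGetD current i 0 = PySem.List.pyGetD target i 0))]
    rw [PySem.List.foldl_append_ite]
    rw [pv_filter_eq current target i hi0 hskip.1 hskip.2]
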